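-- pv_equiv track=rewrite | github.com/sloproo/advent_of_code_2023 | 11/01.py | matka
-- ===== SOURCE A (Python) =====
-- tyhjat_rivit = []
--
-- tyhjat_palkit = []
--
-- def matka(eka: tuple, toka: tuple, tyhjat_palkit: list = tyhjat_palkit, tyhjat_rivit: list = tyhjat_rivit) -> int:
--     palautettava = abs(eka[0] - toka[0]) + abs(eka[1] - toka[1])
--     ylitettavat_tyhjat_rivit = 0
--     ylitettavat_tyhjat_palkit = 0
--     for y in range(min(eka[0]+1, toka[0]), max(eka[0], toka[0])):
--         if y in tyhjat_rivit:
--             ylitettavat_tyhjat_rivit += 1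
--     for x in range(min(eka[1]+1, toka[1]), max([eka[1], toka[1]])):
--         if x in tyhjat_palkit:
--             ylitettavat_tyhjat_palkit += 1
--
--     kasvukerroin = 1000000
--     palautettava += (kasvukerroin - 1) * (ylitettavat_tyhjat_rivit + ylitettavat_tyhjat_palkit)
--     return palautettava
-- ===== SOURCE B (Python) =====
-- tyhjat_rivit = []
--
-- tyhjat_palkit = []
--
-- def matka(eka: tuple, toka: tuple, tyhjat_palkit: list = tyhjat_palkit, tyhjat_rivit: list = tyhjat_rivit) -> int:
--     # Instead of scanning the whole coordinate range and testing membership for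
--     # each cell (O(range * n)), scan the (deduplicated) empties once and count
--     # those falling in the crossed interval (O(n)).
--     def crossed(a, b, empties):
--         lo, hi = min(a + 1, b), max(a, b)
--         return sum(1 for v in set(empties) if lo <= v < hi)
--
--     dist = abs(eka[0] - toka[0]) + abs(eka[1] - toka[1])
--     extra = crossed(eka[0], toka[0], tyhjat_rivit) + crossed(eka[1], toka[1], tyhjat_palkit)
--     return dist + 999999 * extra
-- ===== Notes on version B (the rewrite author's own statement) =====
-- stated objective: faster
-- what changed: B iterates once over the deduplicated list of empty rows/cols and counts those inside the crossed interval, instead of A's loop over every coordinate in the range testing list membership.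
import Mathlib
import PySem

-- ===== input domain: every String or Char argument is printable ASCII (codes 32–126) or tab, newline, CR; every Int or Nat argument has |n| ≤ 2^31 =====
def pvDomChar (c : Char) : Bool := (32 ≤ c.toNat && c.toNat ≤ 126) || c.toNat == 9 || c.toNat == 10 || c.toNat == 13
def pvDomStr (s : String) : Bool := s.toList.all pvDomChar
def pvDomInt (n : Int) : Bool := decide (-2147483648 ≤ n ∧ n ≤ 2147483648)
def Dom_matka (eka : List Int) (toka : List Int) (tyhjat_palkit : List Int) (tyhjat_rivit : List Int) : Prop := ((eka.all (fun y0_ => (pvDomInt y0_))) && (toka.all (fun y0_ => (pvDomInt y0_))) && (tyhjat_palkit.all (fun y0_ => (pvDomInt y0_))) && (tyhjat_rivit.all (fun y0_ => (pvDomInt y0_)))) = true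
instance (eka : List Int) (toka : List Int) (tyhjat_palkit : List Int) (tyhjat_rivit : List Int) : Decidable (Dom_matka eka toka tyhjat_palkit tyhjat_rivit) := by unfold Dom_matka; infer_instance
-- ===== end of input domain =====

-- B replaces A's scan of every integer in the crossed coordinate range by a single
-- scan of the deduplicated empty-row/col lists, counting those inside the interval.

-- ===== PORT A =====
def matka (eka : List Int) (toka : List Int) (tyhjat_palkit : List Int) (tyhjat_rivit : List Int) : Int :=
  let e0 := PySem.List.pyGetD eka 0 0
  let e1 := PySem.List.pyGetD eka 1 0
  let t0 := PySem.List.pyGetD toka 0 0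
  let t1 := PySem.List.pyGetD toka 1 0
  let palautettava := |e0 - t0| + |e1 - t1|
  let ylitettavat_tyhjat_rivit :=
    (PySem.List.pyRange (min (e0 + 1) t0) (max e0 t0) 1).foldl
      (fun acc y => if y ∈ tyhjat_rivit then acc + 1 else acc) (0 : Int)
  let ylitettavat_tyhjat_palkit :=
    (PySem.List.pyRange (min (e1 + 1) t1) (max e1 t1) 1).foldl
      (fun acc x => if x ∈ tyhjat_palkit then acc + 1 else acc) (0 : Int)
  let kasvukerroin : Int := 1000000
  palautettava + (kasvukerroin - 1) * (ylitettavat_tyhjat_rivit + ylitettavat_tyhjat_palkit)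

-- ===== PORT B =====
-- crossed(a, b, empties): count distinct empties v with min(a+1,b) ≤ v < max(a,b)
def matkaCrossed (a b : Int) (empties : List Int) : Int :=
  (PySem.Set.ofList empties).foldl
    (fun acc v => if min (a + 1) b ≤ v ∧ v < max a b then acc + 1 else acc) (0 : Int)

def matka_alt (eka : List Int) (toka : List Int) (tyhjat_palkit : List Int) (tyhjat_rivit : List Int) : Int :=
  let e0 := PySem.List.pyGetD eka 0 0
  let e1 := PySem.List.pyGetD eka 1 0
  let t0 := PySem.List.pyGetD toka 0 0
  let t1 := PySem.List.pyGetD toka 1 0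
  let dist := |e0 - t0| + |e1 - t1|
  let extra := matkaCrossed e0 t0 tyhjat_rivit + matkaCrossed e1 t1 tyhjat_palkit
  dist + 999999 * extra

-- ===== PRECONDITION & SPEC =====
-- Python A raises IndexError when either tuple has fewer than two components.
def Pre_matka (eka : List Int) (toka : List Int) (tyhjat_palkit : List Int) (tyhjat_rivit : List Int) : Prop :=
  2 ≤ eka.length ∧ 2 ≤ toka.length
instance (eka : List Int) (toka : List Int) (tyhjat_palkit : List Int) (tyhjat_rivit : List Int) : Decidable (Pre_matka eka toka tyhjat_palkit tyhjat_rivit) := by unfold Pre_matka; infer_instance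
def pvWitness_matka : List Int × List Int × List Int × List Int := ([0, 0], [2, 3], [1], [1])

def Spec_matka (eka : List Int) (toka : List Int) (tyhjat_palkit : List Int) (tyhjat_rivit : List Int) (out : Int) : Prop := out = matka_alt eka toka tyhjat_palkit tyhjat_rivit
instance (eka : List Int) (toka : List Int) (tyhjat_palkit : List Int) (tyhjat_rivit : List Int) (out : Int) : Decidable (Spec_matka eka toka tyhjat_palkit tyhjat_rivit out) := by unfold Spec_matka; infer_instance

-- ===== CLAIM (what is proved, stated in full; the proofs are below) =====
def Claim_equal_matka : Prop := ∀ (eka : List Int) (toka : List Int) (tyhjat_palkit : List Int) (tyhjat_rivit : List Int), Dom_matka eka toka tyhjat_palkit tyhjat_rivit → Pre_matka eka toka tyhjat_palkit tyhjat_rivit → Spec_matka eka toka tyhjat_palkit tyhjat_rivit (matka eka toka tyhjat_palkit tyhjat_rivit)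

-- ===== LEMMAS AND PROOFS =====

-- the crossing count over the coordinate range equals the count over the deduplicated empties
theorem crossed_eq (lo hi : Int) (l : List Int) :
    (PySem.List.pyRange lo hi 1).foldl (fun acc y => if y ∈ l then acc + 1 else acc) (0 : Int)
      = (PySem.Set.ofList l).foldl (fun acc v => if lo ≤ v ∧ v < hi then acc + 1 else acc) (0 : Int) := by
  rw [PySem.List.foldl_ite_add_one, PySem.List.foldl_ite_add_one]
  congr 1
  rw [List.countP_eq_length_filter, List.countP_eq_length_filter]
  norm_cast
  apply List.Perm.length_eq
  apply (List.perm_ext_iff_of_nodup ?_ ?_).2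
  · intro x
    simp [PySem.List.mem_pyRange_one, PySem.Set.mem_ofList]
    tauto
  · exact (PySem.List.nodup_pyRange_one lo hi).filter _
  · exact (PySem.Set.nodup_ofList l).filter _

-- ===== VERDICT (by name: the statement is the Claim_ definition above) =====
theorem matka_spec : Claim_equal_matka := by
  intro eka toka tp tr _ _
  unfold Spec_matka
  simp only [matka, matka_alt, matkaCrossed, crossed_eq]
  ring
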